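-- pv_equiv track=rewrite | github.com/99003713/python_labs | Decision_and_loops/function1.py | maxafter
-- ===== SOURCE A (Python) =====
-- def maxafter(n):
--     a = 0
--     i = 1
--     # t = 0
--     while (n//i > 0):
--         t=(n//(i*10))*i+(n%i)
--         i = i*10
--         if t>a:
--             a = t
--     return a
-- ===== SOURCE B (Python) =====
-- def maxafter(n):
--     # Recursive formulation: removing one digit of n either drops the last
--     # digit (n // 10) or drops a digit of n // 10 and re-appends the last one.
--     if n < 10:
--         return 0
--     return max(n // 10, maxafter(n // 10) * 10 + n % 10)
-- ===== Notes on version B (the rewrite author's own statement) =====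
-- stated objective: simpler
-- what changed: Replaces A's iterative scan over growing powers of ten with accumulator splicing by a direct recursion on the quotient by ten: the answer is the larger of dropping the last digit and recursing on the remaining digits with the last digit re-appended.
import Mathlib
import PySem

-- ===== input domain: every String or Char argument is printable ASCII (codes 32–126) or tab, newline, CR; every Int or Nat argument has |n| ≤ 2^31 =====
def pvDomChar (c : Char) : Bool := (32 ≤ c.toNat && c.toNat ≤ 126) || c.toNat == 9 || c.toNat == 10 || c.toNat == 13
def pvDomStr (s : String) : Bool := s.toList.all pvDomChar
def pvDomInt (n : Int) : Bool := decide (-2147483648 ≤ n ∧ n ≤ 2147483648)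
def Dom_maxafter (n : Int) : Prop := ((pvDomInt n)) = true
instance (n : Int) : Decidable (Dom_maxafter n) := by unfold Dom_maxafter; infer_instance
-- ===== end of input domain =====

-- B replaces A's iterative scan over powers of ten by a direct recursion on n // 10 (simpler).

-- ===== PORT A =====
-- A's while loop; `hi : 0 < i` records that i, starting at 1 and only multiplied
-- by 10, stays positive (needed for termination; proof-irrelevant).
def maxafterLoop (n a i : Int) (hi : 0 < i) : Int :=
  if PySem.Int.floordiv n i > 0 then
    let t := PySem.Int.floordiv n (i * 10) * i + PySem.Int.mod n i
    maxafterLoop n (if t > a then t else a) (i * 10) (by positivity)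
  else a
termination_by (PySem.Int.floordiv n i).toNat
decreasing_by
  rw [PySem.Int.floordiv_eq_ediv_of_pos (by positivity),
      PySem.Int.floordiv_eq_ediv_of_pos hi] at *
  rw [← Int.ediv_ediv_of_nonneg (by omega : (0:Int) ≤ i)]
  have h2 : 0 < n / i := by omega
  have := Int.ediv_lt_iff_lt_mul (a := n / i) (b := 10) (c := n / i) (by omega)
  omega

def maxafter (n : Int) : Int := maxafterLoop n 0 1 (by norm_num)

-- ===== PORT B =====
def maxafter_alt (n : Int) : Int :=
  if n < 10 then 0
  else max (PySem.Int.floordiv n 10)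
           (maxafter_alt (PySem.Int.floordiv n 10) * 10 + PySem.Int.mod n 10)
termination_by n.toNat
decreasing_by
  rw [PySem.Int.floordiv_eq_ediv_of_pos (by norm_num)]
  have : n / 10 < n := by rw [Int.ediv_lt_iff_lt_mul (by omega)]; nlinarith [show (10:Int) ≤ n by omega]
  have : 0 ≤ n / 10 := Int.ediv_nonneg (by omega) (by omega)
  omega

-- ===== PRECONDITION & SPEC =====
def Spec_maxafter (n : Int) (out : Int) : Prop := out = maxafter_alt n
instance (n : Int) (out : Int) : Decidable (Spec_maxafter n out) := by unfold Spec_maxafter; infer_instance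

-- ===== CLAIM (what is proved, stated in full; the proofs are below) =====
def Claim_equal_maxafter : Prop := ∀ (n : Int), Dom_maxafter n → Spec_maxafter n (maxafter n)

-- ===== LEMMAS AND PROOFS =====

-- The list of candidate values A's loop maximises over.
def candList (n i : Int) (hi : 0 < i) : List Int :=
  if PySem.Int.floordiv n i > 0 then
    (PySem.Int.floordiv n (i * 10) * i + PySem.Int.mod n i) :: candList n (i * 10) (by positivity)
  else []
termination_by (PySem.Int.floordiv n i).toNat
decreasing_by
  rw [PySem.Int.floordiv_eq_ediv_of_pos (by positivity),
      PySem.Int.floordiv_eq_ediv_of_pos hi] at *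
  rw [← Int.ediv_ediv_of_nonneg (by omega : (0:Int) ≤ i)]
  have h2 : 0 < n / i := by omega
  have := Int.ediv_lt_iff_lt_mul (a := n / i) (b := 10) (c := n / i) (by omega)
  omega

theorem maxafterLoop_eq_foldl (n a i : Int) (hi : 0 < i) :
    maxafterLoop n a i hi = List.foldl max a (candList n i hi) := by
  fun_induction maxafterLoop n a i hi with
  | case1 a i hi hcond t ih =>
      rw [candList, if_pos hcond]
      simp only [List.foldl]
      simp only [dite_eq_ite] at ih
      rw [ih]
      congr 1
      rw [show PySem.Int.floordiv n (i * 10) * i + PySem.Int.mod n i = t from rfl]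
      simp only [max_def]
      split_ifs <;> omega
  | case2 a i hi hcond =>
      rw [candList, if_neg hcond]
      rfl

theorem foldl_max_acc (l : List Int) : ∀ a b : Int, List.foldl max (max a b) l = max a (List.foldl max b l) := by
  induction l with
  | nil => intro a b; rfl
  | cons x t ih => intro a b; simp only [List.foldl, max_assoc, ih]

theorem foldl_max_map_affine (r : Int) (l : List Int) :
    ∀ x : Int, List.foldl max (x * 10 + r) (l.map (fun y => y * 10 + r)) =
      (List.foldl max x l) * 10 + r := by
  induction l with
  | nil => intro x; rfl
  | cons y t ih =>
      intro x
      simp only [List.map, List.foldl, ← ih]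
      congr 1
      simp only [max_def]
      split_ifs <;> omega

theorem candList_congr (n i i' : Int) (h : 0 < i) (h' : 0 < i') (e : i = i') :
    candList n i h = candList n i' h' := by subst e; rfl

theorem emod_split (n j : Int) :
    n % (10 * j) = (n / 10 % j) * 10 + n % 10 := by
  have h1 : n / 10 / j = n / (10 * j) := Int.ediv_ediv_of_nonneg (by norm_num)
  rw [Int.emod_def n (10 * j), Int.emod_def (n / 10) j, Int.emod_def n 10, ← h1]
  ring

theorem floordiv_chain (n j : Int) (hj : 0 < j) :
    PySem.Int.floordiv n (10 * j) = PySem.Int.floordiv (PySem.Int.floordiv n 10) j := by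
  rw [PySem.Int.floordiv_eq_ediv_of_pos (by positivity),
      PySem.Int.floordiv_eq_ediv_of_pos (by norm_num : (0:Int) < 10),
      PySem.Int.floordiv_eq_ediv_of_pos hj,
      Int.ediv_ediv_of_nonneg (by norm_num : (0:Int) ≤ 10)]

theorem candList_pos (n i : Int) (hi : 0 < i) (hc : PySem.Int.floordiv n i > 0) :
    candList n i hi =
      (PySem.Int.floordiv n (i * 10) * i + PySem.Int.mod n i) ::
        candList n (i * 10) (by positivity) := by
  conv_lhs => rw [candList]
  rw [if_pos hc]

theorem candList_neg (n i : Int) (hi : 0 < i) (hc : ¬ PySem.Int.floordiv n i > 0) :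
    candList n i hi = [] := by
  conv_lhs => rw [candList]
  rw [if_neg hc]

theorem ediv_ten_lt (m : Int) (hm : 0 < m) : m / 10 < m := by
  rw [Int.ediv_lt_iff_lt_mul (by norm_num)]; nlinarith

theorem candList_scale (N : Nat) :
    ∀ (n j : Int) (hj : 0 < j) (h10j : 0 < 10 * j),
    (PySem.Int.floordiv (PySem.Int.floordiv n 10) j).toNat ≤ N →
    candList n (10 * j) h10j =
      (candList (PySem.Int.floordiv n 10) j hj).map
        (fun y => y * 10 + PySem.Int.mod n 10) := by
  induction N with
  | zero =>
      intro n j hj h10j hN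
      have hcR : ¬ (PySem.Int.floordiv (PySem.Int.floordiv n 10) j > 0) := by omega
      have hcL : ¬ (PySem.Int.floordiv n (10 * j) > 0) := by
        rw [floordiv_chain n j hj]; exact hcR
      rw [candList_neg _ _ _ hcL, candList_neg _ _ _ hcR]
      simp
  | succ N ih =>
      intro n j hj h10j hN
      have hd10 : PySem.Int.floordiv n 10 = n / 10 := PySem.Int.floordiv_eq_ediv_of_pos (by norm_num)
      have hdj : PySem.Int.floordiv (PySem.Int.floordiv n 10) j = n / 10 / j := by
        rw [hd10]; exact PySem.Int.floordiv_eq_ediv_of_pos hj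
      by_cases hcR : PySem.Int.floordiv (PySem.Int.floordiv n 10) j > 0
      · have hcL : PySem.Int.floordiv n (10 * j) > 0 := by
          rw [floordiv_chain n j hj]; exact hcR
        rw [candList_pos _ _ _ hcL, candList_pos _ _ _ hcR, List.map]
        have e1 : 10 * j * 10 = 10 * (j * 10) := by ring
        have h1 : PySem.Int.floordiv n (10 * j * 10) =
            PySem.Int.floordiv (PySem.Int.floordiv n 10) (j * 10) := by
          rw [e1]; exact floordiv_chain n (j * 10) (by positivity)
        have h2 : PySem.Int.mod n (10 * j) =
            PySem.Int.mod (PySem.Int.floordiv n 10) j * 10 + PySem.Int.mod n 10 := by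
          rw [PySem.Int.mod_eq_emod_of_pos h10j, PySem.Int.mod_eq_emod_of_pos hj,
              PySem.Int.mod_eq_emod_of_pos (by norm_num : (0:Int) < 10), hd10]
          exact emod_split n j
        congr 1
        · rw [h1, h2]; ring
        · rw [candList_congr n (10 * j * 10) (10 * (j * 10)) (by positivity) (by positivity) e1]
          refine ih n (j * 10) (by positivity) (by positivity) ?_
          have hdj10 : PySem.Int.floordiv (PySem.Int.floordiv n 10) (j * 10) = n / 10 / j / 10 := by
            rw [hd10, PySem.Int.floordiv_eq_ediv_of_pos (by positivity),
                ← Int.ediv_ediv_of_nonneg (le_of_lt hj)]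
          have hpos : 0 < n / 10 / j := by omega
          have hlt : n / 10 / j / 10 < n / 10 / j := ediv_ten_lt _ hpos
          have hnn : 0 ≤ n / 10 / j / 10 := Int.ediv_nonneg (by omega) (by norm_num)
          rw [hdj10]
          omega
      · have hcL : ¬ (PySem.Int.floordiv n (10 * j) > 0) := by
          rw [floordiv_chain n j hj]; exact hcR
        rw [candList_neg _ _ _ hcL, candList_neg _ _ _ hcR]
        simp

theorem le_foldl_max (l : List Int) : ∀ a : Int, a ≤ List.foldl max a l := by
  induction l with
  | nil => intro a; exact le_refl a
  | cons x t ih => intro a; exact le_trans (le_max_left a x) (ih (max a x))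

theorem maxafter_alt_small (n : Int) (h : n < 10) : maxafter_alt n = 0 := by
  rw [maxafter_alt, if_pos h]

theorem maxafter_small (n : Int) (h : n < 10) : maxafter n = 0 := by
  unfold maxafter
  have h1 : PySem.Int.floordiv n 1 = n := by
    rw [PySem.Int.floordiv_eq_ediv_of_pos one_pos, Int.ediv_one]
  by_cases hp : 0 < n
  · have h10 : PySem.Int.floordiv n (1 * 10) = 0 := by
      rw [PySem.Int.floordiv_eq_ediv_of_pos (by norm_num)]
      exact Int.ediv_eq_zero_of_lt (le_of_lt hp) (by omega)
    have hm1 : PySem.Int.mod n 1 = 0 := by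
      rw [PySem.Int.mod_eq_emod_of_pos one_pos, Int.emod_one]
    rw [maxafterLoop, if_pos (by omega : PySem.Int.floordiv n 1 > 0)]
    rw [maxafterLoop, if_neg (by omega : ¬ PySem.Int.floordiv n (1 * 10) > 0)]
    have hnd : n / 10 = 0 := Int.ediv_eq_zero_of_lt (by omega) (by omega)
    simp [hnd]
  · rw [maxafterLoop, if_neg (by omega : ¬ PySem.Int.floordiv n 1 > 0)]

theorem maxafter_eq_alt_aux (N : Nat) : ∀ (n : Int), n.toNat ≤ N → maxafter n = maxafter_alt n := by
  induction N with
  | zero =>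
      intro n hN
      have h : n < 10 := by omega
      rw [maxafter_small n h, maxafter_alt_small n h]
  | succ N ih =>
      intro n hN
      by_cases h10 : n < 10
      · rw [maxafter_small n h10, maxafter_alt_small n h10]
      · rw [not_lt] at h10
        have hd10 : PySem.Int.floordiv n 10 = n / 10 := PySem.Int.floordiv_eq_ediv_of_pos (by norm_num)
        have hm1 : 1 ≤ n / 10 := by
          have := Int.le_ediv_iff_mul_le (a := 1) (b := n) (c := 10) (by norm_num)
          omega
        have hmlt : n / 10 < n := ediv_ten_lt n (by omega)
        have hIH : maxafter (n / 10) = maxafter_alt (n / 10) := ih (n / 10) (by omega)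
        set r := PySem.Int.mod n 10 with hr
        have hr0 : 0 ≤ r := PySem.Int.mod_nonneg n (by norm_num)
        -- unfold A's loop into the candidate-list fold
        have hA : maxafter n = List.foldl max 0 (candList n 1 one_pos) :=
          maxafterLoop_eq_foldl n 0 1 one_pos
        -- first candidate: n // 10
        have hc1 : PySem.Int.floordiv n 1 > 0 := by
          rw [PySem.Int.floordiv_eq_ediv_of_pos one_pos, Int.ediv_one]; omega
        have hhead : PySem.Int.floordiv n (1 * 10) * 1 + PySem.Int.mod n 1 = n / 10 := by
          rw [PySem.Int.mod_eq_emod_of_pos one_pos, Int.emod_one,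
          PySem.Int.floordiv_eq_ediv_of_pos (by norm_num)]
          norm_num
        have hL1 : candList n 1 one_pos = (n / 10) ::
            (candList (PySem.Int.floordiv n 10) 1 one_pos).map (fun y => y * 10 + r) := by
          rw [candList_pos n 1 one_pos hc1, hhead,
              candList_congr n (1 * 10) (10 * 1) (by norm_num) (by norm_num) (by ring),
              candList_scale ((PySem.Int.floordiv (PySem.Int.floordiv n 10) 1).toNat) n 1
                one_pos (by norm_num) (le_refl _)]
        -- the inner list is nonempty; expose its head
        have hc2 : PySem.Int.floordiv (n / 10) 1 > 0 := by
          rw [PySem.Int.floordiv_eq_ediv_of_pos one_pos, Int.ediv_one]; omega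
        have hL2 : candList (n / 10) 1 one_pos =
            (PySem.Int.floordiv (n / 10) (1 * 10) * 1 + PySem.Int.mod (n / 10) 1) ::
              candList (n / 10) (1 * 10) (by norm_num) :=
          candList_pos (n / 10) 1 one_pos hc2
        set x := PySem.Int.floordiv (n / 10) (1 * 10) * 1 + PySem.Int.mod (n / 10) 1 with hx
        have hx0 : 0 ≤ x := by
          rw [hx, PySem.Int.floordiv_eq_ediv_of_pos (by norm_num),
              PySem.Int.mod_eq_emod_of_pos one_pos, Int.emod_one]
          have := Int.ediv_nonneg (by omega : (0:Int) ≤ n / 10) (by norm_num : (0:Int) ≤ 1 * 10)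
          omega
        set tl := candList (n / 10) (1 * 10) (by norm_num : (0:Int) < 1 * 10) with htl
        -- A's value on n / 10, as a fold over the same inner list
        have hAm : maxafter (n / 10) = List.foldl max x tl := by
          rw [show maxafter (n / 10) = List.foldl max 0 (candList (n / 10) 1 one_pos) from
                maxafterLoop_eq_foldl (n / 10) 0 1 one_pos, hL2]
          simp only [List.foldl]
          rw [max_eq_right hx0]
        -- now compute A's value on n
        rw [hA, hL1, hd10, hL2]
        simp only [List.map, List.foldl]
        rw [max_eq_right (by omega : (0:Int) ≤ n / 10)]
        rw [show max (n / 10) (x * 10 + r) = max (n / 10) (max 0 (x * 10 + r)) from by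
              rw [max_eq_right (by positivity : (0:Int) ≤ x * 10 + r)]]
        rw [foldl_max_acc, foldl_max_acc]
        rw [max_eq_right (le_trans (by positivity : (0:Int) ≤ x * 10 + r)
              (le_foldl_max (tl.map (fun y => y * 10 + r)) (x * 10 + r)))]
        rw [foldl_max_map_affine r tl x, ← hAm, hIH]
        conv_rhs => rw [maxafter_alt]
        rw [if_neg (by omega : ¬ n < 10), hd10, hr]

theorem maxafter_eq_alt (n : Int) : maxafter n = maxafter_alt n :=
  maxafter_eq_alt_aux n.toNat n (le_refl _)

-- ===== VERDICT (by name: the statement is the Claim_ definition above) =====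
theorem maxafter_spec : Claim_equal_maxafter := by
  intro n _
  unfold Spec_maxafter
  exact maxafter_eq_alt n
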